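-- pv_equiv track=rewrite | github.com/anwardksshk/THTD-python-project-2 | app.py | calculate_data
-- ===== SOURCE A (Python) =====
-- def calculate_data(team):
--     inexp = 0
--     exp = 0
--     total = 0
--
--     for player in team:
--         total+=player['height']
--         if player['experience'] == True:
--             exp+=1
--         elif player['experience'] == False:
--             inexp+=1
--
--     return inexp, exp, total
-- ===== SOURCE B (Python) =====
-- def calculate_data(team):
--     total = sum(p['height'] for p in team)
--     exp = sum(1 for p in team if p['experience'] == True)
--     inexp = sum(1 for p in team if p['experience'] == False)
--     return inexp, exp, total
-- ===== Notes on version B (the rewrite author's own statement) =====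
-- stated objective: simpler
-- what changed: Replaces the single fused loop carrying three accumulators with three independent one-line reductions (a sum over heights and two filtered counts), keeping the exact == True / == False comparisons.
import Mathlib
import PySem

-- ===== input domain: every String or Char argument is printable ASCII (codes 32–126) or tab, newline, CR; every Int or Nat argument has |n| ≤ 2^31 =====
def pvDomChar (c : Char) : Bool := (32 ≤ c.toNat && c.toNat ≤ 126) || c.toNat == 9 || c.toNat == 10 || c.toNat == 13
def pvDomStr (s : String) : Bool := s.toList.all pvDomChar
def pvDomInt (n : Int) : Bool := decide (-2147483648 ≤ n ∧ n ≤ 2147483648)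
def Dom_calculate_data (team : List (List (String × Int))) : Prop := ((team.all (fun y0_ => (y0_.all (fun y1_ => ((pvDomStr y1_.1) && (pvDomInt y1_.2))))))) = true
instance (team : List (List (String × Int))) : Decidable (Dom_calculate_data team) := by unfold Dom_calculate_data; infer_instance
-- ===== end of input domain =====

-- B replaces A's single fused loop (three accumulators) with three independent reductions:
-- a height sum and two filtered counts; same O(n) cost, simpler decomposition.


-- ===== PORT A =====
-- dict lookup player['k'] = first match in the association list; getD 0 is only
-- reached outside Pre_ (missing key = Python KeyError).
def calculate_data (team : List (List (String × Int))) : Int × Int × Int :=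
  team.foldl
    (fun st player =>
      let total := st.2.2 + ((List.lookup "height" player).getD 0)
      if (List.lookup "experience" player).getD 0 == 1 then (st.1, st.2.1 + 1, total)
      else if (List.lookup "experience" player).getD 0 == 0 then (st.1 + 1, st.2.1, total)
      else (st.1, st.2.1, total))
    (0, 0, 0)

-- ===== PORT B =====
def calculate_data_alt (team : List (List (String × Int))) : Int × Int × Int :=
  let total := (team.map (fun p => (List.lookup "height" p).getD 0)).sum
  let exp : Int := (team.filter (fun p => (List.lookup "experience" p).getD 0 == 1)).length
  let inexp : Int := (team.filter (fun p => (List.lookup "experience" p).getD 0 == 0)).length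
  (inexp, exp, total)

-- ===== PRECONDITION & SPEC =====
-- Pre_ excludes exactly the players missing a 'height' or 'experience' key, on which Python A raises KeyError.
def Pre_calculate_data (team : List (List (String × Int))) : Prop :=
  ∀ p ∈ team, (List.lookup "height" p).isSome ∧ (List.lookup "experience" p).isSome
instance (team : List (List (String × Int))) : Decidable (Pre_calculate_data team) := by unfold Pre_calculate_data; infer_instance
def pvWitness_calculate_data : (List (List (String × Int))) :=
  [[("height", 5), ("experience", 1)], [("height", 3), ("experience", 0)]]
def Spec_calculate_data (team : List (List (String × Int))) (out : Int × Int × Int) : Prop := out = calculate_data_alt team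
instance (team : List (List (String × Int))) (out : Int × Int × Int) : Decidable (Spec_calculate_data team out) := by unfold Spec_calculate_data; infer_instance

-- ===== CLAIM (what is proved, stated in full; the proofs are below) =====
def Claim_equal_calculate_data : Prop := ∀ (team : List (List (String × Int))), Dom_calculate_data team → Pre_calculate_data team → Spec_calculate_data team (calculate_data team)

-- ===== LEMMAS AND PROOFS =====
lemma calc_fold_aux (team : List (List (String × Int))) : ∀ (a b c : Int),
    team.foldl
      (fun st player =>
        let total := st.2.2 + ((List.lookup "height" player).getD 0)
        if (List.lookup "experience" player).getD 0 == 1 then (st.1, st.2.1 + 1, total)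
        else if (List.lookup "experience" player).getD 0 == 0 then (st.1 + 1, st.2.1, total)
        else (st.1, st.2.1, total))
      (a, b, c)
    = (a + ((team.filter (fun p => (List.lookup "experience" p).getD 0 == 0)).length : Int),
       b + ((team.filter (fun p => (List.lookup "experience" p).getD 0 == 1)).length : Int),
       c + (team.map (fun p => (List.lookup "height" p).getD 0)).sum) := by
  induction team with
  | nil => intro a b c; simp
  | cons p rest ih =>
      intro a b c
      simp only [List.foldl_cons, List.filter_cons, List.map_cons, List.sum_cons]
      by_cases h1 : ((List.lookup "experience" p).getD 0 == 1) = true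
      · have h0 : ((List.lookup "experience" p).getD 0 == 0) = false := by
          simp_all
        simp only [h1, h0, if_true, ih, List.length_cons, Prod.mk.injEq]
        push_cast; and_intros <;> first | trivial | ring
      · simp only [h1, if_false, Bool.false_eq_true]
        by_cases h0 : ((List.lookup "experience" p).getD 0 == 0) = true
        · simp only [h0, if_true, ih, List.length_cons, Prod.mk.injEq]
          push_cast; and_intros <;> first | trivial | ring
        · simp only [h0, if_false, Bool.false_eq_true, ih, Prod.mk.injEq]
          and_intros <;> first | trivial | ring

-- ===== VERDICT (by name: the statement is the Claim_ definition above) =====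
theorem calculate_data_spec : Claim_equal_calculate_data := by
  intro team _ _
  show calculate_data team = calculate_data_alt team
  unfold calculate_data calculate_data_alt
  rw [calc_fold_aux]
  simp
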